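-- pv_equiv track=rewrite | github.com/karan-13-hub/among-us | evaluations/metrics_calculator.py | _meeting_timestep_for_step
-- ===== SOURCE A (Python) =====
-- from typing import Any, Dict, List, Optional, Sequence, Tuple
--
-- def _meeting_timestep_for_step(
--     step: int, meeting_timesteps: Sequence[int]
-- ) -> int | None:
--     """Map a compact-log ``step`` to the active meeting timestep ``t``.
--
--     Uses the largest ``pre_meeting`` timestep ``t`` with ``t <= step``; if
--     ``step`` is before the first meeting, buckets into the first meeting.
--     """
--     if not meeting_timesteps:
--         return None
--     ts_sorted = sorted(meeting_timesteps)
--     eligible = [t for t in ts_sorted if t <= step]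
--     if eligible:
--         return max(eligible)
--     return ts_sorted[0]
-- ===== SOURCE B (Python) =====
-- def _meeting_timestep_for_step(step, meeting_timesteps):
--     """Largest meeting timestep <= step, else the minimum; None if empty.
--
--     Binary search (bisect_right by hand) over the sorted list instead of
--     filter + max.
--     """
--     if not meeting_timesteps:
--         return None
--     ts_sorted = sorted(meeting_timesteps)
--     lo, hi = 0, len(ts_sorted)
--     while lo < hi:
--         mid = (lo + hi) // 2
--         if ts_sorted[mid] <= step:
--             lo = mid + 1
--         else:
--             hi = mid
--     if lo > 0:
--         return ts_sorted[lo - 1]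
--     return ts_sorted[0]
-- ===== Notes on version B (the rewrite author's own statement) =====
-- stated objective: alternative
-- what changed: Replaces the filter-comprehension plus max() with a hand-written bisect_right binary search over the sorted list, branching on the insertion index.
import Mathlib
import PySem

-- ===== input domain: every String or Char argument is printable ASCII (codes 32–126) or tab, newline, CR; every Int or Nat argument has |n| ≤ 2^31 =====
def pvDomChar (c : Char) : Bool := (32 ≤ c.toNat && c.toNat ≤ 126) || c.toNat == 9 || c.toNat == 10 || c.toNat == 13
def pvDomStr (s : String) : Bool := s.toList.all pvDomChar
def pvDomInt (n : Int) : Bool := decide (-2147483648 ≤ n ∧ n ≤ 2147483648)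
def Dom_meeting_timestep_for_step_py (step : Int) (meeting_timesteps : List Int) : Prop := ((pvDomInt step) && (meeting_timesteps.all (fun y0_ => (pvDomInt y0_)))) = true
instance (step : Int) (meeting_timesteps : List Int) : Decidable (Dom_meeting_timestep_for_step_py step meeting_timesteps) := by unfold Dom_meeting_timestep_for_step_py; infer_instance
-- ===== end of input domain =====

-- B replaces A's filter-comprehension + max() with a hand-written bisect_right
-- binary search over the sorted list (alternative algorithm, same result).


-- ===== PORT A =====
def meeting_timestep_for_step_py (step : Int) (meeting_timesteps : List Int) : Option Int :=
  if meeting_timesteps = [] then none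
  else
    let ts_sorted := PySem.List.sorted meeting_timesteps (fun t => t)
    let eligible := ts_sorted.filter (fun t => decide (t ≤ step))
    if eligible ≠ [] then PySem.List.max? eligible (fun t => t)
    else PySem.List.pyGet? ts_sorted 0

-- ===== PORT B =====
-- the while-loop of Source B: lo, hi with mid = (lo+hi)//2; fuel bounds the iterations
-- (hi - lo strictly decreases, so fuel = length suffices, as for PySem's own bisect)
def pvBisectLoop (xs : List Int) (step : Int) : Nat → Nat → Nat → Nat
  | 0, lo, _ => lo
  | fuel+1, lo, hi =>
    if lo < hi then
      match xs[(lo+hi)/2]? with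
      | some y => if y ≤ step then pvBisectLoop xs step fuel ((lo+hi)/2+1) hi
                  else pvBisectLoop xs step fuel lo ((lo+hi)/2)
      | none => lo
    else lo

def meeting_timestep_for_step_py_alt (step : Int) (meeting_timesteps : List Int) : Option Int :=
  if meeting_timesteps = [] then none
  else
    let ts_sorted := PySem.List.sorted meeting_timesteps (fun t => t)
    let lo := pvBisectLoop ts_sorted step ts_sorted.length 0 ts_sorted.length
    if 0 < lo then PySem.List.pyGet? ts_sorted ((lo : Int) - 1)
    else PySem.List.pyGet? ts_sorted 0

-- ===== PRECONDITION & SPEC =====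
def Spec_meeting_timestep_for_step_py (step : Int) (meeting_timesteps : List Int) (out : Option Int) : Prop := out = meeting_timestep_for_step_py_alt step meeting_timesteps
instance (step : Int) (meeting_timesteps : List Int) (out : Option Int) : Decidable (Spec_meeting_timestep_for_step_py step meeting_timesteps out) := by unfold Spec_meeting_timestep_for_step_py; infer_instance

-- ===== CLAIM (what is proved, stated in full; the proofs are below) =====
def Claim_equal_meeting_timestep_for_step_py : Prop := ∀ (step : Int) (meeting_timesteps : List Int), Dom_meeting_timestep_for_step_py step meeting_timesteps → Spec_meeting_timestep_for_step_py step meeting_timesteps (meeting_timestep_for_step_py step meeting_timesteps)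

-- ===== LEMMAS AND PROOFS =====

-- Source B's hand-written loop is PySem's bisect_right loop (the if is flipped: y ≤ step vs step < y)
theorem pvBisectLoop_eq (xs : List Int) (step : Int) :
    ∀ (fuel lo hi : Nat), pvBisectLoop xs step fuel lo hi = PySem.List.bisectRightLoop xs step fuel lo hi := by
  intro fuel
  induction fuel with
  | zero => intro lo hi; rfl
  | succ f ih =>
    intro lo hi
    simp only [pvBisectLoop, PySem.List.bisectRightLoop]
    by_cases h : lo < hi
    · simp only [if_pos h]
      cases hx : xs[(lo+hi)/2]? with
      | none => rfl
      | some y =>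
        dsimp only
        by_cases hy : y ≤ step
        · rw [if_pos hy, if_neg (by omega), ih]
        · rw [if_neg hy, if_pos (by omega), ih]
    · simp [h]

theorem pvBisect_eq (xs : List Int) (step : Int) :
    pvBisectLoop xs step xs.length 0 xs.length = PySem.List.bisectRight xs step := by
  rw [pvBisectLoop_eq]; rfl

-- sortedness gives index monotonicity
theorem sorted_getElem_le (s : List Int) (hs : s.Pairwise (· ≤ ·)) (i j : Nat)
    (hij : i ≤ j) (hj : j < s.length) : s[i]'(by omega) ≤ s[j] := by
  rcases Nat.lt_or_ge i j with h | h
  · exact List.pairwise_iff_getElem.mp hs i j (by omega) hj h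
  · have : i = j := by omega
    subst this; exact le_refl _

theorem meeting_timestep_main (step : Int) (mts : List Int) :
    meeting_timestep_for_step_py step mts = meeting_timestep_for_step_py_alt step mts := by
  by_cases h0 : mts = []
  · simp [meeting_timestep_for_step_py, meeting_timestep_for_step_py_alt, h0]
  · unfold meeting_timestep_for_step_py meeting_timestep_for_step_py_alt
    rw [if_neg h0, if_neg h0]
    dsimp only
    set s := PySem.List.sorted mts (fun t => t) with hsdef
    have hs : s.Pairwise (· ≤ ·) := PySem.List.sorted_pairwise mts (fun t => t)
    have hlen : s ≠ [] := by
      intro h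
      have hp := PySem.List.sorted_perm mts (fun t => t) false
      rw [hsdef] at h
      rw [h] at hp
      exact h0 hp.nil_eq.symm
    rw [pvBisect_eq]
    obtain ⟨hle, hsmall, hbig⟩ := PySem.List.bisectRight_spec s step hs
    set idx := PySem.List.bisectRight s step with hidx
    by_cases hpos : 0 < idx
    · -- eligible nonempty; A's max = s[idx-1] = B's answer
      have hidxlt : idx - 1 < s.length := by omega
      have helig : s[idx-1] ∈ s.filter (fun t => decide (t ≤ step)) := by
        rw [List.mem_filter]
        exact ⟨List.getElem_mem _, by simpa using hsmall (idx-1) hidxlt (by omega)⟩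
      rw [if_pos (List.ne_nil_of_mem helig), if_pos hpos]
      -- A side: max? is some m
      cases hm : PySem.List.max? (s.filter (fun t => decide (t ≤ step))) (fun t => t) with
      | none =>
        exact absurd ((PySem.List.max?_eq_none_iff _ _).mp hm) (List.ne_nil_of_mem helig)
      | some m =>
        -- B side value
        have hcast : (idx : Int) - 1 = ((idx - 1 : Nat) : Int) := by omega
        rw [hcast, PySem.List.pyGet?_natCast, List.getElem?_eq_getElem hidxlt]
        -- m = s[idx-1]
        have hmem := PySem.List.max?_mem hm
        rw [List.mem_filter] at hmem
        obtain ⟨hmem_s, hmle⟩ := hmem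
        have hmle : m ≤ step := by simpa using hmle
        obtain ⟨j, hj, hjm⟩ := List.mem_iff_getElem.mp hmem_s
        have hjlt : j < idx := by
          by_contra hc
          have := hbig j hj (by omega)
          rw [hjm] at this
          omega
        have h1 : m ≤ s[idx-1] := by
          rw [← hjm]
          exact sorted_getElem_le s hs j (idx-1) (by omega) hidxlt
        have h2 : s[idx-1] ≤ m := PySem.List.max?_isMax hm _ helig
        have : m = s[idx-1] := le_antisymm h1 h2
        rw [this]
    · -- idx = 0: everything is > step, eligible is empty, both return s[0]
      have hidx0 : idx = 0 := by omega
      have hfe : s.filter (fun t => decide (t ≤ step)) = [] := by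
        rw [List.filter_eq_nil_iff]
        intro x hx
        obtain ⟨j, hj, hjx⟩ := List.mem_iff_getElem.mp hx
        have := hbig j hj (by omega)
        rw [hjx] at this
        simpa using (by omega : ¬ x ≤ step)
      rw [if_neg (by simp [hfe]), if_neg hpos]

-- ===== VERDICT (by name: the statement is the Claim_ definition above) =====
theorem meeting_timestep_for_step_py_spec : Claim_equal_meeting_timestep_for_step_py := by
  intro step mts _
  unfold Spec_meeting_timestep_for_step_py
  exact meeting_timestep_main step mts
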